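-- pv_equiv track=rewrite | github.com/gunbarif-wq/krinv-auto | main.py | merge_unique_bars
-- ===== SOURCE A (Python) =====
-- from typing import Dict, List, Any
--
-- def merge_unique_bars(existing: List[Dict[str, str]], fresh: List[Dict[str, str]]) -> List[Dict[str, str]]:
--     merged: Dict[str, Dict[str, str]] = {}
--     for r in existing + fresh:
--         d = str(r.get("stck_bsop_date", ""))
--         t = str(r.get("stck_cntg_hour", ""))
--         if d and t:
--             merged[f"{d}{t}"] = r
--     return [merged[k] for k in sorted(merged.keys())]
-- ===== SOURCE B (Python) =====
-- def merge_unique_bars(existing, fresh):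
--     # Pair every valid record with its date+hour key, stable-sort by key,
--     # then keep only the last record of each run of equal keys.
--     pairs = []
--     for r in existing + fresh:
--         d = str(r.get("stck_bsop_date", ""))
--         t = str(r.get("stck_cntg_hour", ""))
--         if d and t:
--             pairs.append((d + t, r))
--     pairs.sort(key=lambda p: p[0])  # stable: existing-before-fresh order kept on ties
--     out = []
--     for i, (k, r) in enumerate(pairs):
--         if i + 1 == len(pairs) or k != pairs[i + 1][0]:
--             out.append(r)
--     return out
-- ===== Notes on version B (the rewrite author's own statement) =====
-- stated objective: alternative
-- what changed: Replaces the last-wins dict plus key sort with a dict-free pipeline: build (key, record) pairs, stable-sort them by key, and emit the last record of each run of equal keys.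
import Mathlib
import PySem

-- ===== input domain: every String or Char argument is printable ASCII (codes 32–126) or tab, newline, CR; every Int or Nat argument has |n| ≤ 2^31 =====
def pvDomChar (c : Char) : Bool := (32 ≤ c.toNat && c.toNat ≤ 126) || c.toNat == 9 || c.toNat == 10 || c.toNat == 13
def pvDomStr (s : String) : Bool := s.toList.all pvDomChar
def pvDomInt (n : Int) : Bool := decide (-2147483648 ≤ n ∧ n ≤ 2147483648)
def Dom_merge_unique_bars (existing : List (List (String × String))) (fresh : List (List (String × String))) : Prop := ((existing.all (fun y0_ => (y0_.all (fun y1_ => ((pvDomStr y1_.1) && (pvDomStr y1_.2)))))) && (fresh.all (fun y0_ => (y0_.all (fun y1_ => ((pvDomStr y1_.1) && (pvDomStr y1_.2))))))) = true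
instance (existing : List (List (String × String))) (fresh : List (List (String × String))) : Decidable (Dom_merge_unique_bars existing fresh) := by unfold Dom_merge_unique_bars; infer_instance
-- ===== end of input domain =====

-- B replaces A's last-wins dict + key sort with a dict-free stable sort of (key, record) pairs
-- followed by a keep-last-of-each-run scan (objective: alternative; same return value).


-- ===== PORT A =====
-- r.get(k, "") on a record (a Python dict, encoded as an assoc list; PySem.Dict.ofList is dict(pairs));
-- A's str(...) is the identity on these string values.
def pvGet (r : List (String × String)) (k : String) : String :=
  (PySem.Dict.ofList r).getD k ""

-- Literal port of A: one pass filling a last-wins dict keyed by f"{d}{t}" (keys kept as List Char so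
-- that key comparison/sorting is Python's code-point order), then the values in sorted-key order.
-- merged[k] in the final comprehension is ported as getD with default [] (k ∈ merged.keys, no KeyError).
def merge_unique_bars (existing : List (List (String × String))) (fresh : List (List (String × String))) : List (List (String × String)) :=
  let merged : PySem.Dict (List Char) (List (String × String)) :=
    (existing ++ fresh).foldl (fun m r =>
      let d := (pvGet r "stck_bsop_date").toList
      let t := (pvGet r "stck_cntg_hour").toList
      if d ≠ [] ∧ t ≠ [] then m.insert (d ++ t) r else m) PySem.Dict.empty
  (PySem.List.sorted merged.keys (fun k => k) false).map (fun k => merged.getD k [])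

-- ===== PORT B =====
-- Source B's emit loop ("append pairs[i] if i is last or the next key differs"), as recursion on
-- (current pair, rest of the sorted list), comparing the current key with the next one. Exact.
def pvScan (p : List Char × List (String × String)) :
    List (List Char × List (String × String)) → List (List (String × String))
  | [] => [p.2]
  | q :: t => if p.1 ≠ q.1 then p.2 :: pvScan q t else pvScan q t

-- Literal port of B: build the (key, record) pair list, stable-sort it by key, keep-last-of-run scan.
def merge_unique_bars_alt (existing : List (List (String × String))) (fresh : List (List (String × String))) : List (List (String × String)) :=
  let pairs : List (List Char × List (String × String)) :=
    (existing ++ fresh).foldl (fun acc r =>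
      let d := (pvGet r "stck_bsop_date").toList
      let t := (pvGet r "stck_cntg_hour").toList
      if d ≠ [] ∧ t ≠ [] then acc ++ [(d ++ t, r)] else acc) []
  match PySem.List.sorted pairs (fun p => p.1) false with
  | [] => []
  | p :: rest => pvScan p rest

-- ===== PRECONDITION & SPEC =====
def Spec_merge_unique_bars (existing : List (List (String × String))) (fresh : List (List (String × String))) (out : List (List (String × String))) : Prop := out = merge_unique_bars_alt existing fresh
instance (existing : List (List (String × String))) (fresh : List (List (String × String))) (out : List (List (String × String))) : Decidable (Spec_merge_unique_bars existing fresh out) := by unfold Spec_merge_unique_bars; infer_instance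

-- ===== CLAIM (what is proved, stated in full; the proofs are below) =====
def Claim_equal_merge_unique_bars : Prop := ∀ (existing : List (List (String × String))) (fresh : List (List (String × String))), Dom_merge_unique_bars existing fresh → Spec_merge_unique_bars existing fresh (merge_unique_bars existing fresh)

-- ===== LEMMAS AND PROOFS =====

-- the key of a record, and the guarded (key, record) pair list both loops produce
def pvKey (r : List (String × String)) : List Char :=
  (pvGet r "stck_bsop_date").toList ++ (pvGet r "stck_cntg_hour").toList

def pvOk (r : List (String × String)) : Bool :=
  decide ((pvGet r "stck_bsop_date").toList ≠ [] ∧ (pvGet r "stck_cntg_hour").toList ≠ [])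

def pvPairs (rs : List (List (String × String))) : List (List Char × List (String × String)) :=
  (rs.filter pvOk).map (fun r => (pvKey r, r))

-- pair version of pvScan, for the proofs
def pvScanP (p : List Char × List (String × String)) :
    List (List Char × List (String × String)) → List (List Char × List (String × String))
  | [] => [p]
  | q :: t => if p.1 ≠ q.1 then p :: pvScanP q t else pvScanP q t

-- the comparison PySem.List.sorted uses on (key, record) pairs
def pvBefore (a b : List Char × List (String × String)) : Bool := decide (a.1 < b.1)

lemma pvScan_eq_map_snd (p : List Char × List (String × String)) (t : List (List Char × List (String × String))) :
    pvScan p t = (pvScanP p t).map (fun z => z.2) := by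
  induction t generalizing p with
  | nil => simp [pvScan, pvScanP]
  | cons q t ih =>
    simp only [pvScan, pvScanP]
    split_ifs with h
    · simp [ih]
    · exact ih q

lemma pvPairs_cons (r : List (String × String)) (rs : List (List (String × String))) :
    pvPairs (r :: rs)
      = (if ((pvGet r "stck_bsop_date").toList ≠ [] ∧ (pvGet r "stck_cntg_hour").toList ≠ [])
          then [((pvGet r "stck_bsop_date").toList ++ (pvGet r "stck_cntg_hour").toList, r)] else [])
        ++ pvPairs rs := by
  simp only [pvPairs, List.filter_cons, pvOk, pvKey, decide_eq_true_eq]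
  split_ifs with h
  · simp
  · simp

lemma pvB_fold (rs : List (List (String × String))) (acc : List (List Char × List (String × String))) :
    rs.foldl (fun acc r =>
      let d := (pvGet r "stck_bsop_date").toList
      let t := (pvGet r "stck_cntg_hour").toList
      if d ≠ [] ∧ t ≠ [] then acc ++ [(d ++ t, r)] else acc) acc = acc ++ pvPairs rs := by
  induction rs generalizing acc with
  | nil => simp [pvPairs]
  | cons r rs ih =>
    simp only [List.foldl_cons]
    by_cases hc : ((pvGet r "stck_bsop_date").toList ≠ [] ∧ (pvGet r "stck_cntg_hour").toList ≠ [])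
    · rw [if_pos hc, ih, pvPairs_cons, if_pos hc, List.append_assoc]
    · rw [if_neg hc, ih, pvPairs_cons, if_neg hc, List.nil_append]

lemma pvA_fold (rs : List (List (String × String))) (m : PySem.Dict (List Char) (List (String × String))) :
    rs.foldl (fun m r =>
      let d := (pvGet r "stck_bsop_date").toList
      let t := (pvGet r "stck_cntg_hour").toList
      if d ≠ [] ∧ t ≠ [] then m.insert (d ++ t) r else m) m
    = (pvPairs rs).foldl (fun m p => m.insert p.1 p.2) m := by
  induction rs generalizing m with
  | nil => simp [pvPairs]
  | cons r rs ih =>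
    simp only [List.foldl_cons]
    by_cases hc : ((pvGet r "stck_bsop_date").toList ≠ [] ∧ (pvGet r "stck_cntg_hour").toList ≠ [])
    · rw [if_pos hc, ih, pvPairs_cons, if_pos hc]
      simp [List.foldl_cons]
    · rw [if_neg hc, ih, pvPairs_cons, if_neg hc]
      simp

-- last-wins dict lookup = last matching pair
lemma pvGet?_fold (P : List (List Char × List (String × String)))
    (d : PySem.Dict (List Char) (List (String × String))) (k : List Char) :
    (P.foldl (fun m p => m.insert p.1 p.2) d).get? k
      = ((P.filter (fun p => p.1 == k)).getLast?.map (fun z => z.2)).or (d.get? k) := by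
  induction P using List.reverseRecOn generalizing d with
  | nil => simp
  | append_singleton ps p ih =>
    rw [List.foldl_append]
    simp only [List.foldl_cons, List.foldl_nil]
    rw [PySem.Dict.get?_insert, List.filter_append]
    by_cases hk : p.1 = k
    · simp [hk]
    · have hk' : ¬ k = p.1 := fun h => hk h.symm
      simp [hk, hk', ih]

-- PySem.List.sorted does not depend on the choice of the DecidableLT instance
lemma pvSorted_inst {α κ : Type} [LT κ] (i1 i2 : (a b : κ) → Decidable (a < b))
    (P : List α) (f : α → κ) :
    @PySem.List.sorted α κ _ i1 P f false = @PySem.List.sorted α κ _ i2 P f false := by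
  have h : (fun (a b : α) => @decide (f a < f b) (i1 (f a) (f b)))
      = (fun (a b : α) => @decide (f a < f b) (i2 (f a) (f b))) := by
    funext a b
    exact decide_eq_decide.mpr Iff.rfl
  show List.foldl (fun acc x => PySem.List.insertBy (fun a b => @decide (f a < f b) (i1 (f a) (f b))) x acc) [] P
      = List.foldl (fun acc x => PySem.List.insertBy (fun a b => @decide (f a < f b) (i2 (f a) (f b))) x acc) [] P
  rw [h]

-- PySem.List.sorted_pairwise / sorted_eq_of_perm_of_pairwise_lt, restated with the
-- DecidableLT instance the ports elaborate with (the two LT instances are defeq)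
lemma pvSorted_pairwise {α : Type} (P : List α) (f : α → List Char) :
    (PySem.List.sorted P f false).Pairwise (fun a b => f a ≤ f b) := by
  rw [pvSorted_inst _ (fun a b => @LinearOrder.toDecidableLT _ List.instLinearOrder a b) P f]
  exact PySem.List.sorted_pairwise P f

lemma pvSorted_eq_lt {α : Type} (xs ys : List α) (f : α → List Char)
    (hp : ys.Perm xs) (hlt : ys.Pairwise (fun a b => f a < f b)) :
    PySem.List.sorted xs f false = ys := by
  rw [pvSorted_inst _ (fun a b => @LinearOrder.toDecidableLT _ List.instLinearOrder a b) xs f]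
  exact PySem.List.sorted_eq_of_perm_of_pairwise_lt xs ys f hp hlt

-- one more insertion-sort step
lemma pvSorted_append (ps : List (List Char × List (String × String)))
    (x : List Char × List (String × String)) :
    PySem.List.sorted (ps ++ [x]) (fun p => p.1) false
      = PySem.List.insertBy pvBefore x (PySem.List.sorted ps (fun p => p.1) false) := by
  show List.foldl (fun acc y => PySem.List.insertBy pvBefore y acc) [] (ps ++ [x])
      = PySem.List.insertBy pvBefore x (List.foldl (fun acc y => PySem.List.insertBy pvBefore y acc) [] ps)
  rw [List.foldl_append, List.foldl_cons, List.foldl_nil]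

-- stability of PySem.List.sorted: each key's run keeps the original order
lemma pvFilter_insertBy (x : List Char × List (String × String))
    (l : List (List Char × List (String × String))) (k : List Char)
    (hs : l.Pairwise (fun a b => a.1 ≤ b.1)) :
    (PySem.List.insertBy pvBefore x l).filter (fun p => p.1 == k)
      = l.filter (fun p => p.1 == k) ++ (if x.1 = k then [x] else []) := by
  induction l with
  | nil =>
    by_cases hxk : x.1 = k
    · simp [PySem.List.insertBy, hxk]
    · simp [PySem.List.insertBy, hxk]
  | cons y ys ih =>
    have hs' : ys.Pairwise (fun a b => a.1 ≤ b.1) := (List.pairwise_cons.1 hs).2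
    by_cases hxy : x.1 < y.1
    · rw [show PySem.List.insertBy pvBefore x (y :: ys) = x :: y :: ys from by
        simp [PySem.List.insertBy, pvBefore, hxy]]
      by_cases hxk : x.1 = k
      · have hnone : List.filter (fun p => p.1 == k) (y :: ys) = [] := by
          rw [List.filter_eq_nil_iff]
          intro b hb'
          have hyb : y.1 ≤ b.1 := by
            rcases List.mem_cons.1 hb' with h | h
            · rw [h]
            · exact (List.pairwise_cons.1 hs).1 b h
          have hkb : k < b.1 := lt_of_lt_of_le (hxk ▸ hxy) hyb
          simpa using (ne_of_gt hkb)
        simp [hxk, hnone]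
      · simp [List.filter_cons, hxk]
    · rw [show PySem.List.insertBy pvBefore x (y :: ys) = y :: PySem.List.insertBy pvBefore x ys from by
        simp [PySem.List.insertBy, pvBefore, hxy]]
      rw [List.filter_cons, List.filter_cons, ih hs']
      by_cases hyk : y.1 = k
      · simp [hyk]
      · simp [hyk]

lemma pvFilter_sorted (P : List (List Char × List (String × String))) (k : List Char) :
    (PySem.List.sorted P (fun p => p.1) false).filter (fun p => p.1 == k)
      = P.filter (fun p => p.1 == k) := by
  induction P using List.reverseRecOn with
  | nil => rfl
  | append_singleton ps x ih =>
    rw [pvSorted_append ps x,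
      pvFilter_insertBy x _ k (pvSorted_pairwise ps (fun p => p.1)), ih, List.filter_append]
    by_cases hxk : x.1 = k
    · simp [hxk]
    · simp [hxk]

lemma pvScanP_mem_keys (t : List (List Char × List (String × String)))
    (p : List Char × List (String × String)) (k : List Char) :
    k ∈ (pvScanP p t).map (fun p => p.1) ↔ k ∈ (p :: t).map (fun p => p.1) := by
  induction t generalizing p with
  | nil => simp [pvScanP]
  | cons q t ih =>
    simp only [pvScanP]
    split_ifs with h
    · have := ih q
      simp only [List.map_cons, List.mem_cons] at this ⊢
      tauto
    · have hpq : p.1 = q.1 := not_not.1 (by simpa using h)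
      have := ih q
      simp only [List.map_cons, List.mem_cons] at this ⊢
      constructor
      · intro hk
        right
        exact this.1 hk
      · rintro (hk | hk)
        · exact this.2 (Or.inl (hpq ▸ hk))
        · exact this.2 hk

lemma pvScanP_pairwise (t : List (List Char × List (String × String)))
    (p : List Char × List (String × String))
    (h : (p :: t).Pairwise (fun a b => a.1 ≤ b.1)) :
    (pvScanP p t).Pairwise (fun a b => a.1 < b.1) := by
  induction t generalizing p with
  | nil => simp [pvScanP]
  | cons q t ih =>
    have h1 : ∀ b ∈ q :: t, p.1 ≤ b.1 := (List.pairwise_cons.1 h).1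
    have h2 : (q :: t).Pairwise (fun a b => a.1 ≤ b.1) := (List.pairwise_cons.1 h).2
    have hge : ∀ b ∈ q :: t, q.1 ≤ b.1 := by
      intro b hb
      rcases List.mem_cons.1 hb with hb' | hb'
      · rw [hb']
      · exact (List.pairwise_cons.1 h2).1 b hb'
    simp only [pvScanP]
    split_ifs with hne
    · have hlt : p.1 < q.1 := lt_of_le_of_ne (h1 q (by simp)) hne
      rw [List.pairwise_cons]
      constructor
      · intro b hb
        have hb1 : b.1 ∈ (q :: t).map (fun p => p.1) :=
          (pvScanP_mem_keys t q b.1).1 (List.mem_map.2 ⟨b, hb, rfl⟩)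
        rcases List.mem_map.1 hb1 with ⟨w, hw, hw1⟩
        exact lt_of_lt_of_le hlt (hw1 ▸ hge w hw)
      · exact ih q h2
    · exact ih q h2

lemma pvScanP_last (t : List (List Char × List (String × String)))
    (p : List Char × List (String × String))
    (h : (p :: t).Pairwise (fun a b => a.1 ≤ b.1)) :
    ∀ z ∈ pvScanP p t, ((p :: t).filter (fun w => w.1 == z.1)).getLast? = some z := by
  induction t generalizing p with
  | nil =>
    intro z hz
    have hzp : z = p := by simpa [pvScanP] using hz
    subst hzp
    simp
  | cons q t ih =>
    have h1 : ∀ b ∈ q :: t, p.1 ≤ b.1 := (List.pairwise_cons.1 h).1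
    have h2 : (q :: t).Pairwise (fun a b => a.1 ≤ b.1) := (List.pairwise_cons.1 h).2
    have hge : ∀ b ∈ q :: t, q.1 ≤ b.1 := by
      intro b hb
      rcases List.mem_cons.1 hb with hb' | hb'
      · rw [hb']
      · exact (List.pairwise_cons.1 h2).1 b hb'
    intro z hz
    simp only [pvScanP] at hz
    split_ifs at hz with hne
    · -- p.1 < q.1 : every key in q :: t is above p.1
      have hlt : p.1 < q.1 := lt_of_le_of_ne (h1 q (by simp)) hne
      rcases List.mem_cons.1 hz with hzp | hz'
      · subst hzp
        have hnone : List.filter (fun w => w.1 == z.1) (q :: t) = [] := by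
          rw [List.filter_eq_nil_iff]
          intro b hb'
          have hzb : z.1 < b.1 := lt_of_lt_of_le hlt (hge b hb')
          simpa using (ne_of_gt hzb)
        rw [List.filter_cons, if_pos (by simp), hnone]
        rfl
      · have hzk : z.1 ∈ (q :: t).map (fun p => p.1) :=
          (pvScanP_mem_keys t q z.1).1 (List.mem_map.2 ⟨z, hz', rfl⟩)
        rcases List.mem_map.1 hzk with ⟨w, hw, hw1⟩
        have hgt : p.1 < z.1 := lt_of_lt_of_le hlt (hw1 ▸ hge w hw)
        rw [List.filter_cons, if_neg (by simpa using (ne_of_lt hgt))]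
        exact ih q h2 z hz'
    · -- p.1 = q.1 : the run continues into q :: t
      have hpq : p.1 = q.1 := not_not.1 (by simpa using hne)
      have hrec := ih q h2 z hz
      by_cases hpz : p.1 = z.1
      · have hq : List.filter (fun w => w.1 == z.1) (q :: t)
            = q :: List.filter (fun w => w.1 == z.1) t := by
          rw [List.filter_cons, if_pos (by simp [← hpq, hpz])]
        rw [List.filter_cons, if_pos (by simpa using hpz), hq]
        rw [hq] at hrec
        simpa [List.getLast?_cons_cons] using hrec
      · rw [List.filter_cons, if_neg (by simpa using hpz)]
        exact hrec

-- the core: A's sorted-dict readout equals B's scan, for any pair list P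
lemma pvCore (P : List (List Char × List (String × String))) :
    (PySem.List.sorted (P.foldl (fun m p => m.insert p.1 p.2) (PySem.Dict.empty : PySem.Dict (List Char) (List (String × String)))).keys (fun k => k) false).map
        (fun k => (P.foldl (fun m p => m.insert p.1 p.2) (PySem.Dict.empty : PySem.Dict (List Char) (List (String × String)))).getD k [])
      = match PySem.List.sorted P (fun p => p.1) false with
        | [] => []
        | p :: rest => pvScan p rest := by
  have hperm := PySem.List.sorted_perm P (fun p => p.1) false
  have hpwS := pvSorted_pairwise P (fun p => p.1)
  cases hS : PySem.List.sorted P (fun p => p.1) false with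
  | nil =>
    rw [hS] at hperm
    have hP : P = [] := hperm.symm.eq_nil
    subst hP
    rfl
  | cons p t =>
    rw [hS] at hperm hpwS
    set D := P.foldl (fun m p => m.insert p.1 p.2) (PySem.Dict.empty : PySem.Dict (List Char) (List (String × String))) with hD
    set M := pvScanP p t with hM
    have hkeys : D.keys = PySem.Set.update PySem.Dict.empty.keys (P.map (fun p => p.1)) :=
      PySem.Dict.keys_foldl_insert_key P (fun p => p.1) (fun _ p => p.2) PySem.Dict.empty
    have hnd : D.keys.Nodup :=
      PySem.Dict.nodup_keys_foldl_insert_key P (fun p => p.1) (fun _ p => p.2) PySem.Dict.empty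
        PySem.Dict.nodup_keys_empty
    have hmemD : ∀ k, k ∈ D.keys ↔ k ∈ P.map (fun p => p.1) := by
      intro k
      rw [hkeys]
      simp [PySem.Set.mem_update, PySem.Dict.keys_empty]
    have hmemM : ∀ k, k ∈ M.map (fun p => p.1) ↔ k ∈ P.map (fun p => p.1) := by
      intro k
      rw [hM, pvScanP_mem_keys t p k]
      exact (hperm.map (fun p => p.1)).mem_iff
    have hpwM : M.Pairwise (fun a b => a.1 < b.1) := pvScanP_pairwise t p hpwS
    have hpwK : (M.map (fun p => p.1)).Pairwise (· < ·) := List.pairwise_map.mpr hpwM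
    have hndM : (M.map (fun p => p.1)).Nodup := hpwK.imp (fun hab => ne_of_lt hab)
    have hpermK : (M.map (fun p => p.1)).Perm D.keys :=
      (List.perm_ext_iff_of_nodup hndM hnd).2 (fun a => (hmemM a).trans (hmemD a).symm)
    have hsortK : PySem.List.sorted D.keys (fun k => k) false = M.map (fun p => p.1) :=
      pvSorted_eq_lt D.keys (M.map (fun p => p.1)) (fun k => k) hpermK hpwK
    have hmatch : (match p :: t with
        | [] => ([] : List (List (String × String)))
        | q :: rest => pvScan q rest) = pvScan p t := rfl
    rw [hsortK, List.map_map, hmatch, pvScan_eq_map_snd, hM]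
    refine List.map_congr_left ?_
    intro z hz
    have hlast : ((p :: t).filter (fun w => w.1 == z.1)).getLast? = some z :=
      pvScanP_last t p hpwS z hz
    have hfilt : P.filter (fun w => w.1 == z.1) = (p :: t).filter (fun w => w.1 == z.1) := by
      rw [← pvFilter_sorted P z.1, hS]
    have hget : D.get? z.1 = some z.2 := by
      rw [hD, pvGet?_fold P PySem.Dict.empty z.1, hfilt, hlast]
      simp
    simpa using PySem.Dict.getD_of_get?_eq_some D ([] : List (String × String)) hget

-- ===== VERDICT (by name: the statement is the Claim_ definition above) =====
theorem merge_unique_bars_spec : Claim_equal_merge_unique_bars := by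
  intro existing fresh _
  unfold Spec_merge_unique_bars merge_unique_bars merge_unique_bars_alt
  rw [pvA_fold, pvB_fold]
  simpa using pvCore (pvPairs (existing ++ fresh))
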